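-- pv_equiv track=rewrite | github.com/mabordon/tpfinal | webserver/cluster.py | calculate_summarized
-- ===== SOURCE A (Python) =====
-- def calculate_summarized(results):
--        summarized={}
--        for topic in results:
--          lista=results[topic]
--          summarized[topic]=0
--          neg_count = len(list(filter(lambda x: (x < 0), lista)))
--          pos_count = len(list(filter(lambda x: (x >= 0), lista)))
--          if neg_count>0:
--               summarized[topic]+=1
--          if pos_count>0:
--               summarized[topic]+=1
--        return summarized
-- ===== SOURCE B (Python) =====
-- def calculate_summarized(results):
--     summarized = {}
--     for topic, lista in results.items():
--         seen_neg = seen_nonneg = False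
--         for x in lista:
--             if x < 0:
--                 seen_neg = True
--             else:
--                 seen_nonneg = True
--             if seen_neg and seen_nonneg:
--                 break
--         summarized[topic] = int(seen_neg) + int(seen_nonneg)
--     return summarized
-- ===== Notes on version B (the rewrite author's own statement) =====
-- stated objective: alternative
-- what changed: B replaces A's two full filter-and-count passes per topic with a single existence-detecting pass over the list keeping two booleans (seen_neg, seen_nonneg) and breaking early once both signs have been seen.
import Mathlib
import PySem

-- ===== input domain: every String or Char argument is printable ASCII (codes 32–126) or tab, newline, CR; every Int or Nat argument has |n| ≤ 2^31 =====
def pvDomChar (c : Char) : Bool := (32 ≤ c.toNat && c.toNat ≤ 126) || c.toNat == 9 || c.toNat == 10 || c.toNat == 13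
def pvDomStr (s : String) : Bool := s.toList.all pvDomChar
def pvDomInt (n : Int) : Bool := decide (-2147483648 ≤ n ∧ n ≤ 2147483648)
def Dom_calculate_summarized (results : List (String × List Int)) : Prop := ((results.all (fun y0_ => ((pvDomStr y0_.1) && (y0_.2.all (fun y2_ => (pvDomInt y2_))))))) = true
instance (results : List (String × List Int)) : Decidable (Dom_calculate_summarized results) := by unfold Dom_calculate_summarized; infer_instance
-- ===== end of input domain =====

-- B replaces A's two full filter-count passes per topic by one early-exiting pass
-- with two seen-flags; return values are proved equal on dicts (assoc lists with distinct keys).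


-- ===== PORT A =====
-- literal port of A: for each topic, look the list up in `results` (first match, like the
-- Python dict), count negatives and non-negatives with two filter passes, add 1 for each
-- non-empty count into the summarized dict.
def calculate_summarized (results : List (String × List Int)) : List (String × Int) :=
  (results.foldl (fun (summarized : PySem.Dict String Int) p =>
      let topic := p.1
      let lista := ((PySem.Dict.mk results).get? topic).getD []
      let summarized := summarized.insert topic 0
      let neg_count : Int := ((lista.filter (fun x => decide (x < 0))).length : Int)
      let pos_count : Int := ((lista.filter (fun x => decide (0 ≤ x))).length : Int)
      let summarized := if neg_count > 0 then summarized.insert topic (summarized.getD topic 0 + 1) else summarized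
      let summarized := if pos_count > 0 then summarized.insert topic (summarized.getD topic 0 + 1) else summarized
      summarized)
    PySem.Dict.empty).items

-- ===== PORT B =====
-- one pass over the list with two flags and an early break, as in Source B's inner loop
def pvFlags : List Int → Bool → Bool → Bool × Bool
  | [], seen_neg, seen_nonneg => (seen_neg, seen_nonneg)
  | x :: xs, seen_neg, seen_nonneg =>
    let seen_neg := if x < 0 then true else seen_neg
    let seen_nonneg := if x < 0 then seen_nonneg else true
    if seen_neg && seen_nonneg then (seen_neg, seen_nonneg) else pvFlags xs seen_neg seen_nonneg

def calculate_summarized_alt (results : List (String × List Int)) : List (String × Int) :=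
  (results.foldl (fun (summarized : PySem.Dict String Int) p =>
      let f := pvFlags p.2 false false
      summarized.insert p.1 ((if f.1 then (1 : Int) else 0) + (if f.2 then (1 : Int) else 0)))
    PySem.Dict.empty).items

-- ===== PRECONDITION & SPEC =====
-- Pre_ excludes only association lists with duplicate keys: the Python argument is a dict,
-- whose keys are necessarily distinct, so no actual Python input is excluded.
def Pre_calculate_summarized (results : List (String × List Int)) : Prop :=
  (results.map Prod.fst).Nodup
instance (results : List (String × List Int)) : Decidable (Pre_calculate_summarized results) := by
  unfold Pre_calculate_summarized; infer_instance

def pvWitness_calculate_summarized : (List (String × List Int)) := [("a", [1, -1]), ("b", [])]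

def Spec_calculate_summarized (results : List (String × List Int)) (out : List (String × Int)) : Prop := out = calculate_summarized_alt results
instance (results : List (String × List Int)) (out : List (String × Int)) : Decidable (Spec_calculate_summarized results out) := by unfold Spec_calculate_summarized; infer_instance

-- ===== CLAIM (what is proved, stated in full; the proofs are below) =====
def Claim_equal_calculate_summarized : Prop := ∀ (results : List (String × List Int)), Dom_calculate_summarized results → Pre_calculate_summarized results → Spec_calculate_summarized results (calculate_summarized results)

-- ===== LEMMAS AND PROOFS =====

-- A's loop body (proof-side name for the lambda in the port of A)
def pvStepA (R : List (String × List Int)) (summarized : PySem.Dict String Int)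
    (p : String × List Int) : PySem.Dict String Int :=
  let topic := p.1
  let lista := ((PySem.Dict.mk R).get? topic).getD []
  let summarized := summarized.insert topic 0
  let neg_count : Int := ((lista.filter (fun x => decide (x < 0))).length : Int)
  let pos_count : Int := ((lista.filter (fun x => decide (0 ≤ x))).length : Int)
  let summarized := if neg_count > 0 then summarized.insert topic (summarized.getD topic 0 + 1) else summarized
  let summarized := if pos_count > 0 then summarized.insert topic (summarized.getD topic 0 + 1) else summarized
  summarized

-- B's loop body (proof-side name for the lambda in the port of B)
def pvStepB (summarized : PySem.Dict String Int) (p : String × List Int) : PySem.Dict String Int :=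
  let f := pvFlags p.2 false false
  summarized.insert p.1 ((if f.1 then (1 : Int) else 0) + (if f.2 then (1 : Int) else 0))

def pvValA (l : List Int) : Int :=
  (if ((l.filter (fun x => decide (x < 0))).length : Int) > 0 then (1 : Int) else 0) +
  (if ((l.filter (fun x => decide (0 ≤ x))).length : Int) > 0 then (1 : Int) else 0)

-- inserting twice at the same key equals inserting the last value
theorem pv_insert_insert (d : PySem.Dict String Int) (k : String) (a b : Int) :
    (d.insert k a).insert k b = d.insert k b := by
  apply PySem.Dict.ext
  by_cases h : d.contains k = true
  · rw [PySem.Dict.items_insert_of_contains _ _ (PySem.Dict.contains_insert_self _ _ _),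
      PySem.Dict.items_insert_of_contains _ _ h, PySem.Dict.items_insert_of_contains _ _ h,
      List.map_map]
    refine List.map_congr_left (fun p _ => ?_)
    by_cases hp : p.1 = k <;> simp [hp]
  · rw [PySem.Dict.items_insert_of_contains _ _ (PySem.Dict.contains_insert_self _ _ _),
      PySem.Dict.items_insert_of_not_contains _ _ (by simp [h]),
      PySem.Dict.items_insert_of_not_contains _ _ (by simp [h])]
    have hk : ∀ p ∈ d.items, p.1 ≠ k := by
      intro p hp hpk
      exact h ((PySem.Dict.contains_iff_mem_keys d k).mpr (hpk ▸ PySem.Dict.mem_keys_of_mem_items d hp))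
    simp only [List.map_append, List.map_cons, List.map_nil]
    congr 1
    · refine (List.map_congr_left (fun p hp => ?_)).trans (List.map_id _)
      simp [hk p hp]
    · simp

-- the early-break flag loop computes "any negative" / "any non-negative"
theorem pvFlags_spec (l : List Int) : ∀ (sn sp : Bool),
    pvFlags l sn sp = (sn || l.any (fun x => decide (x < 0)), sp || l.any (fun x => decide (0 ≤ x))) := by
  induction l with
  | nil => intro sn sp; simp [pvFlags]
  | cons x xs ih =>
    intro sn sp
    by_cases hx : x < 0 <;>
      cases sn <;> cases sp <;>
        simp [pvFlags, hx, ih, not_lt.mp]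

-- A's per-topic value equals B's per-topic value
theorem pv_val_eq (l : List Int) :
    pvValA l =
    ((if (pvFlags l false false).1 then (1 : Int) else 0) +
     (if (pvFlags l false false).2 then (1 : Int) else 0)) := by
  rw [pvFlags_spec]
  by_cases ha : ∃ x ∈ l, x < 0 <;> by_cases hb : ∃ x ∈ l, 0 ≤ x <;>
    simp [pvValA, Int.natCast_pos, List.length_pos_iff_exists_mem,
      List.mem_filter, List.any_eq_true, ha, hb]

-- A's per-topic loop body collapses to a single insert of the final value
theorem pv_stepA_eq (R : List (String × List Int)) (d : PySem.Dict String Int)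
    (p : String × List Int) (h : (PySem.Dict.mk R).get? p.1 = some p.2) :
    pvStepA R d p = d.insert p.1 (pvValA p.2) := by
  simp only [pvStepA, pvValA, h, Option.getD_some]
  by_cases h1 : ((p.2.filter (fun x => decide (x < 0))).length : Int) > 0 <;>
    by_cases h2 : ((p.2.filter (fun x => decide (0 ≤ x))).length : Int) > 0 <;>
      simp only [h1, h2, if_true, if_false, PySem.Dict.getD_insert_self, pv_insert_insert] <;>
        norm_num

theorem pv_stepB_eq (d : PySem.Dict String Int) (p : String × List Int) :
    pvStepB d p = d.insert p.1 (pvValA p.2) := by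
  simp only [pvStepB, pv_val_eq]

-- both folds agree given that lookup in `results` returns each pair's own list
theorem pv_fold_eq (rest : List (String × List Int)) :
    ∀ (R : List (String × List Int)) (d : PySem.Dict String Int),
    (∀ p ∈ rest, (PySem.Dict.mk R).get? p.1 = some p.2) →
    rest.foldl (pvStepA R) d = rest.foldl pvStepB d := by
  induction rest with
  | nil => intro R d _; rfl
  | cons p rest ih =>
    intro R d hmem
    rw [List.foldl_cons, List.foldl_cons,
      pv_stepA_eq R d p (hmem p List.mem_cons_self), pv_stepB_eq]
    exact ih R _ (fun q hq => hmem q (List.mem_cons_of_mem _ hq))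

-- ===== VERDICT (by name: the statement is the Claim_ definition above) =====
theorem calculate_summarized_spec : Claim_equal_calculate_summarized := by
  intro results _ hpre
  unfold Spec_calculate_summarized
  show (results.foldl (pvStepA results) PySem.Dict.empty).items =
    (results.foldl pvStepB PySem.Dict.empty).items
  congr 1
  apply pv_fold_eq
  intro q hq
  exact PySem.Dict.get?_of_mem_items _ (by simpa using hq)
    (by simpa [PySem.Dict.keys] using hpre)
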